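-- pv_equiv track=rewrite | github.com/recepcanaltinbag/trapo-seq | insert_finder_from_bam.py | find_large_insertions
-- ===== SOURCE A (Python) =====
-- def find_large_insertions(cigar_tuples, query_start, ref_start, insertion_threshold):
--     insertion_positions = []
--     query_pos = query_start
--     ref_pos = ref_start
--
--     for cigar_type, length in cigar_tuples:
--         if cigar_type == 0:  # Match (alignment)
--             ref_pos += length
--             query_pos += length
--         elif cigar_type == 1:  # Insertion
--             if length > insertion_threshold:  # If insertion is higher than threshold
--                 insertion_positions.append((query_pos, length, ref_pos))
--         elif cigar_type == 2:  # Deletion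
--             ref_pos += length
--         elif cigar_type == 4 or cigar_type == 5:
--             query_pos += length
--
--     return insertion_positions
-- ===== SOURCE B (Python) =====
-- def find_large_insertions(cigar_tuples, query_start, ref_start, insertion_threshold):
--     # Phase 1: table of (query_pos, ref_pos) valid BEFORE each operation.
--     table = []
--     q, r = query_start, ref_start
--     for cigar_type, length in cigar_tuples:
--         table.append((q, r))
--         if cigar_type in (0, 4, 5):
--             q += length
--         if cigar_type in (0, 2):
--             r += length
--     # Phase 2: filter the large insertions against the precomputed table.
--     return [(qp, length, rp)
--             for (qp, rp), (cigar_type, length) in zip(table, cigar_tuples)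
--             if cigar_type == 1 and length > insertion_threshold]
-- ===== Notes on version B (the rewrite author's own statement) =====
-- stated objective: alternative
-- what changed: Replaced A's single stateful accumulate-as-you-go loop by two separate phases: first build a table of pre-operation (query_pos, ref_pos) pairs, then a zip-and-filter comprehension selects the large insertions from that table.
import Mathlib
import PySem

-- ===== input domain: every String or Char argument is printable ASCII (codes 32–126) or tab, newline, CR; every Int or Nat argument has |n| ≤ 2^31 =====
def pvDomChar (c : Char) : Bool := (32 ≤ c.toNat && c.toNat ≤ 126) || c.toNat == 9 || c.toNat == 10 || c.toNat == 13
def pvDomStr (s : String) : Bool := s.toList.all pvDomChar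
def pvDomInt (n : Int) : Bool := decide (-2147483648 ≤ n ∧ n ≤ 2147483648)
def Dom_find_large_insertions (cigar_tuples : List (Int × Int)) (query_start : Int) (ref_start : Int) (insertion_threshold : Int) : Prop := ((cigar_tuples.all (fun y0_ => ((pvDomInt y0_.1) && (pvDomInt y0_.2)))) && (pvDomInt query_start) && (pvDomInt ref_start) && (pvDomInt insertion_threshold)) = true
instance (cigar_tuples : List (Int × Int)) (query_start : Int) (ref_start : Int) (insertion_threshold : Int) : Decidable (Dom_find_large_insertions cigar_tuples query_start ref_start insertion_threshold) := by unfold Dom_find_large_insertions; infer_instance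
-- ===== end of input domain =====

-- B builds a table of pre-operation positions first and then filters it, instead of A's
-- single stateful loop; same cost, different decomposition (objective: alternative).

-- ===== PORT A =====
-- A's single loop, state = (insertion_positions, query_pos, ref_pos).
def find_large_insertions (cigar_tuples : List (Int × Int)) (query_start : Int) (ref_start : Int) (insertion_threshold : Int) : List (Int × Int × Int) :=
  (cigar_tuples.foldl
    (fun (st : List (Int × Int × Int) × Int × Int) (op : Int × Int) =>
      let acc := st.1; let q := st.2.1; let r := st.2.2
      let t := op.1; let l := op.2
      if t = 0 then (acc, q + l, r + l)
      else if t = 1 then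
        (if l > insertion_threshold then (acc ++ [(q, l, r)], q, r) else (acc, q, r))
      else if t = 2 then (acc, q, r + l)
      else if t = 4 ∨ t = 5 then (acc, q + l, r)
      else (acc, q, r))
    ([], query_start, ref_start)).1

-- ===== PORT B =====
-- Phase 1: the table of (query_pos, ref_pos) pairs valid before each operation.
def fliTable (cigar_tuples : List (Int × Int)) (q : Int) (r : Int) : List (Int × Int) :=
  match cigar_tuples with
  | [] => []
  | (t, l) :: rest =>
      (q, r) :: fliTable rest (if t = 0 ∨ t = 4 ∨ t = 5 then q + l else q)
                             (if t = 0 ∨ t = 2 then r + l else r)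

-- Phase 2: zip with the table and filter the large insertions.
def find_large_insertions_alt (cigar_tuples : List (Int × Int)) (query_start : Int) (ref_start : Int) (insertion_threshold : Int) : List (Int × Int × Int) :=
  ((fliTable cigar_tuples query_start ref_start).zip cigar_tuples).filterMap
    (fun p => if p.2.1 = 1 ∧ p.2.2 > insertion_threshold
              then some (p.1.1, p.2.2, p.1.2) else none)

-- ===== PRECONDITION & SPEC =====
def Spec_find_large_insertions (cigar_tuples : List (Int × Int)) (query_start : Int) (ref_start : Int) (insertion_threshold : Int) (out : List (Int × Int × Int)) : Prop := out = find_large_insertions_alt cigar_tuples query_start ref_start insertion_threshold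
instance (cigar_tuples : List (Int × Int)) (query_start : Int) (ref_start : Int) (insertion_threshold : Int) (out : List (Int × Int × Int)) : Decidable (Spec_find_large_insertions cigar_tuples query_start ref_start insertion_threshold out) := by unfold Spec_find_large_insertions; infer_instance

-- ===== CLAIM (what is proved, stated in full; the proofs are below) =====
def Claim_equal_find_large_insertions : Prop := ∀ (cigar_tuples : List (Int × Int)) (query_start : Int) (ref_start : Int) (insertion_threshold : Int), Dom_find_large_insertions cigar_tuples query_start ref_start insertion_threshold → Spec_find_large_insertions cigar_tuples query_start ref_start insertion_threshold (find_large_insertions cigar_tuples query_start ref_start insertion_threshold)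

-- ===== LEMMAS AND PROOFS =====

-- A's loop from an arbitrary accumulator produces acc ++ (B's table-and-filter result).
theorem fli_loop_eq (thr : Int) : ∀ (ct : List (Int × Int)) (acc : List (Int × Int × Int)) (q r : Int),
    (ct.foldl
      (fun (st : List (Int × Int × Int) × Int × Int) (op : Int × Int) =>
        let a := st.1; let qq := st.2.1; let rr := st.2.2
        let t := op.1; let l := op.2
        if t = 0 then (a, qq + l, rr + l)
        else if t = 1 then
          (if l > thr then (a ++ [(qq, l, rr)], qq, rr) else (a, qq, rr))
        else if t = 2 then (a, qq, rr + l)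
        else if t = 4 ∨ t = 5 then (a, qq + l, rr)
        else (a, qq, rr))
      (acc, q, r)).1
    = acc ++ find_large_insertions_alt ct q r thr := by
  intro ct
  induction ct with
  | nil => intro acc q r; simp [find_large_insertions_alt, fliTable]
  | cons op rest ih =>
    intro acc q r
    obtain ⟨t, l⟩ := op
    by_cases h0 : t = 0
    · simp [List.foldl_cons, h0, ih, find_large_insertions_alt, fliTable]
    · by_cases h1 : t = 1
      · by_cases hl : l > thr
        · simp [List.foldl_cons, h1, hl, ih, find_large_insertions_alt, fliTable]
        · simp [List.foldl_cons, h1, hl, ih, find_large_insertions_alt, fliTable]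
      · by_cases h2 : t = 2
        · simp [List.foldl_cons, h2, ih, find_large_insertions_alt, fliTable]
        · by_cases h45 : t = 4 ∨ t = 5
          · simp [List.foldl_cons, h1, h45, ih, find_large_insertions_alt, fliTable, h0, h2]
          · have h4 : ¬ t = 4 := fun h => h45 (Or.inl h)
            have h5 : ¬ t = 5 := fun h => h45 (Or.inr h)
            simp [List.foldl_cons, h0, h1, h2, h4, h5, ih, find_large_insertions_alt, fliTable]

-- ===== VERDICT (by name: the statement is the Claim_ definition above) =====
theorem find_large_insertions_spec : Claim_equal_find_large_insertions := by
  intro ct q r thr _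
  unfold Spec_find_large_insertions find_large_insertions
  simpa using fli_loop_eq thr ct [] q r
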